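-- pv_equiv track=rewrite | github.com/dgunning/edgartools | edgar/files/tables.py | _get_columns_to_remove
-- ===== SOURCE A (Python) =====
-- def _get_columns_to_remove(empty_cols: list[int], max_cols: int) -> set[int]:
--     cols_to_remove = set()
--
--     # Handle leading empty columns
--     for col in range(max_cols):
--         if col in empty_cols:
--             cols_to_remove.add(col)
--         else:
--             break
--
--     # Handle trailing empty columns
--     for col in reversed(range(max_cols)):
--         if col in empty_cols:
--             cols_to_remove.add(col)
--         else:
--             break
--
--     # Handle consecutive empty columns in the middle
--     i = 0
--     while i < max_cols - 1:
--         if i in empty_cols and (i + 1) in empty_cols: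
--             consecutive_empty = 0
--             j = i
--             while j < max_cols and j in empty_cols:
--                 consecutive_empty += 1
--                 j += 1
--             cols_to_remove.update(range(i + 1, i + consecutive_empty))
--             i = j
--         else:
--             i += 1
--
--     return cols_to_remove
-- ===== SOURCE B (Python) =====
-- def _get_columns_to_remove(empty_cols: list[int], max_cols: int) -> set[int]:
--     empties = set(empty_cols)
--     # leading empty prefix
--     lead = 0
--     while lead < max_cols and lead in empties:
--         lead += 1
--     removed = set(range(lead))
--     # trailing empty suffix, scanned from the right
--     t = max_cols - 1
--     while t >= 0 and t in empties:
--         removed.add(t)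
--         t -= 1
--     # any other removable column is an empty column whose left neighbour is empty
--     removed.update(c for c in range(1, max_cols) if c in empties and c - 1 in empties)
--     return removed
-- ===== Notes on version B (the rewrite author's own statement) =====
-- stated objective: faster
-- what changed: B builds a hash set of empty_cols once and replaces A's nested middle run-counting while-loop by a single neighbour-pair rule (a column is removed iff it is in the leading/trailing empty run or both it and its left neighbour are empty), keeping only two boundary scans.
import Mathlib
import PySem

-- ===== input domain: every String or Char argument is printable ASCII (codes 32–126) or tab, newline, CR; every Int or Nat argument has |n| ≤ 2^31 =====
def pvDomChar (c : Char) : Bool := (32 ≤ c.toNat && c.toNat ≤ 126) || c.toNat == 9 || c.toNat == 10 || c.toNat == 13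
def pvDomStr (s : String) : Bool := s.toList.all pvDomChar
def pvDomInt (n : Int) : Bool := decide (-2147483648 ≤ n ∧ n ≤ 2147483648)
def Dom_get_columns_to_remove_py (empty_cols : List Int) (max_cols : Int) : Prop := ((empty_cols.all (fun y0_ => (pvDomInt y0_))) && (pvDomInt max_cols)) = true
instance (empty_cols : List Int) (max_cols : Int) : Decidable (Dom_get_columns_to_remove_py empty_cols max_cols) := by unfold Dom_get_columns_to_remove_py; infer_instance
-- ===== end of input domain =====

-- B replaces A's list-membership scans and nested middle run-counting while loop by a set built once plus a
-- neighbour-pair rule (a non-edge column is removed iff it and its left neighbour are empty).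
-- The while loops are ported with an explicit Nat fuel that is always sufficient (a totality guard only).

-- ===== PORT A =====
-- A's leading and trailing for-loops share one shape: add while a member, break at the first non-member
def pvABreakAdd (empty_cols : List Int) : List Int → PySem.Set Int → PySem.Set Int
  | [], s => s
  | c :: rest, s => if empty_cols.contains c then pvABreakAdd empty_cols rest (PySem.Set.add s c) else s

-- inner while loop of A's middle pass, returning the final value of j; fuel ≥ (max_cols - j).toNat
def pvARun (empty_cols : List Int) (max_cols : Int) : Nat → Int → Int
  | 0, j => j
  | fuel + 1, j =>
    if j < max_cols ∧ empty_cols.contains j = true then pvARun empty_cols max_cols fuel (j + 1) else j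

-- A's middle while loop (state: i, the set); j and consecutive are inlined (consecutive = j - i);
-- fuel ≥ (max_cols - i).toNat, enough since i strictly increases each iteration
def pvAMid (empty_cols : List Int) (max_cols : Int) : Nat → Int → PySem.Set Int → PySem.Set Int
  | 0, _, s => s
  | fuel + 1, i, s =>
    if i < max_cols - 1 then
      if (empty_cols.contains i && empty_cols.contains (i + 1)) = true then
        pvAMid empty_cols max_cols fuel (pvARun empty_cols max_cols (max_cols - i).toNat i)
          (PySem.Set.update s
            (PySem.List.pyRange (i + 1)
              (i + (pvARun empty_cols max_cols (max_cols - i).toNat i - i)) 1))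
      else pvAMid empty_cols max_cols fuel (i + 1) s
    else s

def get_columns_to_remove_py (empty_cols : List Int) (max_cols : Int) : List Int :=
  let s := pvABreakAdd empty_cols (PySem.List.pyRange 0 max_cols 1) PySem.Set.empty
  let s := pvABreakAdd empty_cols (PySem.List.pyRange 0 max_cols 1).reverse s
  pvAMid empty_cols max_cols max_cols.toNat 0 s

-- ===== PORT B =====
-- B: value of `lead` after the first while loop; fuel ≥ (max_cols - lead).toNat
def pvBLead (empties : PySem.Set Int) (max_cols : Int) : Nat → Int → Int
  | 0, lead => lead
  | fuel + 1, lead =>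
    if lead < max_cols ∧ PySem.Set.contains empties lead = true then pvBLead empties max_cols fuel (lead + 1)
    else lead

-- B: the trailing while loop, scanning down from t, adding into the set; fuel ≥ (t + 1).toNat
def pvBTrail (empties : PySem.Set Int) : Nat → Int → PySem.Set Int → PySem.Set Int
  | 0, _, s => s
  | fuel + 1, t, s =>
    if 0 ≤ t ∧ PySem.Set.contains empties t = true then pvBTrail empties fuel (t - 1) (PySem.Set.add s t)
    else s

def get_columns_to_remove_py_alt (empty_cols : List Int) (max_cols : Int) : List Int :=
  let empties := PySem.Set.ofList empty_cols
  let lead := pvBLead empties max_cols max_cols.toNat 0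
  let removed := PySem.Set.ofList (PySem.List.pyRange 0 lead 1)
  let removed := pvBTrail empties max_cols.toNat (max_cols - 1) removed
  PySem.Set.update removed
    ((PySem.List.pyRange 1 max_cols 1).filter
      (fun c => PySem.Set.contains empties c && PySem.Set.contains empties (c - 1)))

-- ===== PRECONDITION & SPEC =====
def Spec_get_columns_to_remove_py (empty_cols : List Int) (max_cols : Int) (out : List Int) : Prop := out = get_columns_to_remove_py_alt empty_cols max_cols
instance (empty_cols : List Int) (max_cols : Int) (out : List Int) : Decidable (Spec_get_columns_to_remove_py empty_cols max_cols out) := by unfold Spec_get_columns_to_remove_py; infer_instance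

-- ===== CLAIM (what is proved, stated in full; the proofs are below) =====
def Claim_equal_get_columns_to_remove_py : Prop := ∀ (empty_cols : List Int) (max_cols : Int), Dom_get_columns_to_remove_py empty_cols max_cols → Spec_get_columns_to_remove_py empty_cols max_cols (get_columns_to_remove_py empty_cols max_cols)

-- ===== LEMMAS AND PROOFS =====

theorem pvContains_ofList (l : List Int) (x : Int) :
    PySem.Set.contains (PySem.Set.ofList l) x = l.contains x := by
  by_cases h : x ∈ l
  · have h1 : x ∈ PySem.Set.ofList l := (PySem.Set.mem_ofList _ _).mpr h
    simp [h, h1]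
  · have h1 : ¬ x ∈ PySem.Set.ofList l := fun hm => h ((PySem.Set.mem_ofList _ _).mp hm)
    simp [h, h1]

theorem pvARun_ge (ec : List Int) (m : Int) :
    ∀ (fuel : Nat) (j : Int), j ≤ pvARun ec m fuel j := by
  intro fuel
  induction fuel with
  | zero => intro j; simp [pvARun]
  | succ f ih =>
    intro j
    rw [pvARun]
    split
    · have := ih (j + 1); omega
    · omega

theorem pvARun_le (ec : List Int) (m : Int) :
    ∀ (fuel : Nat) (j : Int), j ≤ m → pvARun ec m fuel j ≤ m := by
  intro fuel
  induction fuel with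
  | zero => intro j hj; simpa [pvARun] using hj
  | succ f ih =>
    intro j hj
    rw [pvARun]
    split
    · next h => exact ih (j + 1) (by omega)
    · exact hj

theorem pvARun_mem (ec : List Int) (m : Int) :
    ∀ (fuel : Nat) (j k : Int), j ≤ k → k < pvARun ec m fuel j → ec.contains k = true := by
  intro fuel
  induction fuel with
  | zero => intro j k h1 h2; rw [pvARun] at h2; omega
  | succ f ih =>
    intro j k h1 h2
    rw [pvARun] at h2
    split at h2
    · next h =>
      rcases eq_or_lt_of_le h1 with rfl | hlt
      · exact h.2
      · exact ih (j + 1) k (by omega) h2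
    · omega

theorem pvARun_stop (ec : List Int) (m : Int) :
    ∀ (fuel : Nat) (j : Int), (m - j).toNat ≤ fuel → pvARun ec m fuel j < m →
      ec.contains (pvARun ec m fuel j) = false := by
  intro fuel
  induction fuel with
  | zero => intro j hf hm; rw [pvARun] at hm ⊢; omega
  | succ f ih =>
    intro j hf hm
    rw [pvARun] at hm ⊢
    split at hm
    · next h => rw [if_pos h]; exact ih (j + 1) (by omega) hm
    · next h =>
      rw [if_neg h]
      rcases (Decidable.not_and_iff_or_not ..).mp h with h' | h'
      · omega
      · exact Bool.not_eq_true _ ▸ h'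

theorem pvARun_gt (ec : List Int) (m : Int) (fuel : Nat) (j : Int)
    (hf : (m - j).toNat ≤ fuel) (h1 : j < m) (h2 : ec.contains j = true) :
    j < pvARun ec m fuel j := by
  cases fuel with
  | zero => omega
  | succ f =>
    rw [pvARun, if_pos ⟨h1, h2⟩]
    have := pvARun_ge ec m f (j + 1)
    omega

theorem pvBLead_ge (e : PySem.Set Int) (m : Int) :
    ∀ (fuel : Nat) (a : Int), a ≤ pvBLead e m fuel a := by
  intro fuel
  induction fuel with
  | zero => intro a; simp [pvBLead]
  | succ f ih =>
    intro a
    rw [pvBLead]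
    split
    · have := ih (a + 1); omega
    · omega

-- leading pass: A's break-fold over range(max_cols) equals B's counted prefix
theorem pvLead_eq (ec : List Int) (m : Int) :
    ∀ (fuel : Nat) (a : Int) (s : PySem.Set Int), (m - a).toNat ≤ fuel →
      pvABreakAdd ec (PySem.List.pyRange a m 1) s
        = PySem.Set.update s (PySem.List.pyRange a (pvBLead (PySem.Set.ofList ec) m fuel a) 1) := by
  intro fuel
  induction fuel with
  | zero =>
    intro a s hf
    rw [pvBLead, PySem.List.pyRange_one_eq_nil (by omega), PySem.List.pyRange_one_eq_nil (le_refl a),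
        pvABreakAdd, PySem.Set.update_nil]
  | succ f ih =>
    intro a s hf
    by_cases hm : a < m
    · rw [PySem.List.pyRange_one_cons hm, pvABreakAdd]
      by_cases hca : ec.contains a = true
      · have hset : PySem.Set.contains (PySem.Set.ofList ec) a = true := by
          rw [pvContains_ofList]; exact hca
        have hlt : a < pvBLead (PySem.Set.ofList ec) m f (a + 1) := by
          have := pvBLead_ge (PySem.Set.ofList ec) m f (a + 1); omega
        rw [hca, if_pos rfl, pvBLead, if_pos ⟨hm, hset⟩,
            PySem.List.pyRange_one_cons hlt, PySem.Set.update_cons, ih (a + 1) _ (by omega)]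
      · have hca' : ec.contains a = false := by
          cases hval : ec.contains a
          · rfl
          · exact absurd hval hca
        have hset : ¬ (a < m ∧ PySem.Set.contains (PySem.Set.ofList ec) a = true) := by
          rw [pvContains_ofList, hca']; simp
        rw [hca', pvBLead, if_neg hset, PySem.List.pyRange_one_eq_nil (le_refl a),
            PySem.Set.update_nil]
        simp
    · rw [pvBLead, if_neg (by omega), PySem.List.pyRange_one_eq_nil (by omega),
          PySem.List.pyRange_one_eq_nil (le_refl a), pvABreakAdd, PySem.Set.update_nil]

-- trailing pass: A's break-fold over reversed(range(max_cols)) equals B's downward while loop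
theorem pvTrailAux (ec : List Int) :
    ∀ (fuel : Nat) (t : Int) (s : PySem.Set Int), (t + 1).toNat ≤ fuel →
      pvABreakAdd ec (PySem.List.pyRange 0 (t + 1) 1).reverse s
        = pvBTrail (PySem.Set.ofList ec) fuel t s := by
  intro fuel
  induction fuel with
  | zero =>
    intro t s hf
    rw [pvBTrail, PySem.List.pyRange_one_eq_nil (by omega), List.reverse_nil, pvABreakAdd]
  | succ f ih =>
    intro t s hf
    by_cases hm : 0 ≤ t
    · rw [PySem.List.pyRange_one_succ_right (by omega), List.reverse_append,
          List.reverse_singleton, List.singleton_append, pvABreakAdd]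
      by_cases hca : ec.contains t = true
      · have hset : PySem.Set.contains (PySem.Set.ofList ec) t = true := by
          rw [pvContains_ofList]; exact hca
        rw [hca, if_pos rfl, pvBTrail, if_pos ⟨hm, hset⟩]
        have := ih (t - 1) (PySem.Set.add s t) (by omega)
        rwa [show t - 1 + 1 = t from by omega] at this
      · have hca' : ec.contains t = false := by
          cases hval : ec.contains t
          · rfl
          · exact absurd hval hca
        have hset : ¬ (0 ≤ t ∧ PySem.Set.contains (PySem.Set.ofList ec) t = true) := by
          rw [pvContains_ofList, hca']; simp
        rw [hca', pvBTrail, if_neg hset]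
        simp
    · rw [pvBTrail, if_neg (by omega), PySem.List.pyRange_one_eq_nil (by omega),
          List.reverse_nil, pvABreakAdd]

theorem pvTrail_eq (ec : List Int) (m : Int) (s : PySem.Set Int) :
    pvABreakAdd ec (PySem.List.pyRange 0 m 1).reverse s
      = pvBTrail (PySem.Set.ofList ec) m.toNat (m - 1) s := by
  have := pvTrailAux ec m.toNat (m - 1) s (by omega)
  rwa [show m - 1 + 1 = m from by omega] at this

-- middle pass: A's run-jumping while loop adds exactly the empty columns with an empty left neighbour, ascending
theorem pvMid_eq (ec : List Int) (m : Int) :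
    ∀ (fuel : Nat) (i : Int) (s : PySem.Set Int), (m - i).toNat ≤ fuel →
      pvAMid ec m fuel i s
        = PySem.Set.update s ((PySem.List.pyRange (i + 1) m 1).filter
            (fun c => ec.contains c && ec.contains (c - 1))) := by
  intro fuel
  induction fuel with
  | zero =>
    intro i s hf
    rw [pvAMid, PySem.List.pyRange_one_eq_nil (by omega), List.filter_nil, PySem.Set.update_nil]
  | succ f ih =>
    intro i s hf
    by_cases h : i < m - 1
    · rw [pvAMid, if_pos h]
      by_cases hc : (ec.contains i && ec.contains (i + 1)) = true
      · have hc1 : ec.contains i = true := by simp only [Bool.and_eq_true] at hc; exact hc.1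
        have hj1 : i < pvARun ec m (m - i).toNat i :=
          pvARun_gt ec m (m - i).toNat i (le_refl _) (by omega) hc1
        have hj2 : pvARun ec m (m - i).toNat i ≤ m :=
          pvARun_le ec m (m - i).toNat i (by omega)
        rw [if_pos hc, ih _ _ (by omega),
            show i + (pvARun ec m (m - i).toNat i - i) = pvARun ec m (m - i).toNat i from by omega]
        rw [PySem.List.pyRange_one_append (i + 1) (pvARun ec m (m - i).toNat i) m (by omega) hj2,
            List.filter_append, PySem.Set.update_append]
        congr 1
        · congr 1
          symm
          apply List.filter_eq_self.mpr
          intro c hcmem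
          rw [PySem.List.mem_pyRange_one] at hcmem
          rw [pvARun_mem ec m (m - i).toNat i c (by omega) (by omega),
              pvARun_mem ec m (m - i).toNat i (c - 1) (by omega) (by omega)]
          rfl
        · rcases lt_or_eq_of_le hj2 with hlt | heq
          · rw [PySem.List.pyRange_one_cons hlt, List.filter_cons,
                pvARun_stop ec m (m - i).toNat i (le_refl _) hlt, Bool.false_and]
            simp
          · rw [heq, PySem.List.pyRange_one_eq_nil (le_refl m),
                PySem.List.pyRange_one_eq_nil (by omega)]
      · rw [if_neg hc, ih _ _ (by omega)]
        have hpred : (ec.contains (i + 1) && ec.contains (i + 1 - 1)) = false := by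
          rw [show i + 1 - 1 = i from by omega]
          by_cases hci1 : ec.contains (i + 1) = true
          · have hci : ec.contains i = false := by
              cases hval : ec.contains i
              · rfl
              · exact absurd (by rw [hval, hci1]; rfl) hc
            rw [hci, Bool.and_false]
          · have h1 : ec.contains (i + 1) = false := by
              cases hval : ec.contains (i + 1)
              · rfl
              · exact absurd hval hci1
            rw [h1, Bool.false_and]
        rw [PySem.List.pyRange_one_cons (by omega : i + 1 < m), List.filter_cons, hpred]
        rfl
    · rw [pvAMid, if_neg h, PySem.List.pyRange_one_eq_nil (by omega), List.filter_nil,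
          PySem.Set.update_nil]

-- ===== VERDICT (by name: the statement is the Claim_ definition above) =====
theorem get_columns_to_remove_py_spec : Claim_equal_get_columns_to_remove_py := by
  intro ec m _
  show get_columns_to_remove_py ec m = get_columns_to_remove_py_alt ec m
  simp only [get_columns_to_remove_py, get_columns_to_remove_py_alt]
  rw [pvMid_eq ec m m.toNat 0 _ (by omega), pvTrail_eq, pvLead_eq ec m m.toNat 0 _ (by omega),
      PySem.Set.update_empty]
  rw [show (0 : Int) + 1 = 1 from by omega]
  congr 1
  exact List.filter_congr (fun c _ => by rw [pvContains_ofList, pvContains_ofList])
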